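-- pv_equiv track=rewrite | github.com/a-green-hand-jack/antibody-abtigen | scripts/18_prepare_single_antigen_yamls.py | format_residue_ranges
-- ===== SOURCE A (Python) =====
-- from typing import Dict, List, Optional
--
-- def format_residue_ranges(residues: List[int]) -> str:
--     """Converts a list of residue numbers [1, 2, 3, 5] to '1..3,5'."""
--     if not residues:
--         return ""
--
--     ints = sorted(residues)
--     ranges = []
--
--     start = ints[0]
--     prev = ints[0]
--
--     for x in ints[1:]:
--         if x == prev + 1:
--             prev = x
--         else:
--             if start == prev:
--                 ranges.append(str(start))
--             else:
--                 ranges.append(f"{start}..{prev}")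
--             start = x
--             prev = x
--
--     if start == prev:
--         ranges.append(str(start))
--     else:
--         ranges.append(f"{start}..{prev}")
--
--     return ",".join(ranges)
-- ===== SOURCE B (Python) =====
-- def format_residue_ranges(residues):
--     """Converts a list of residue numbers [1, 2, 3, 5] to '1..3,5'."""
--     ints = sorted(residues)
--     if not ints:
--         return ""
--     breaks = [(x, y) for x, y in zip(ints, ints[1:]) if y != x + 1]
--     starts = [ints[0]] + [y for _, y in breaks]
--     ends = [x for x, _ in breaks] + [ints[-1]]
--     return ",".join(str(a) if a == b else f"{a}..{b}" for a, b in zip(starts, ends))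
-- ===== Notes on version B (the rewrite author's own statement) =====
-- stated objective: alternative
-- what changed: B is stateless staged passes instead of A's stateful scan: it collects the break pairs by zipping the sorted list with its own shift, builds the run starts and ends as two whole lists from those pairs, and zips them for formatting - no start/prev state, no in-loop emission, no duplicated trailing flush.
import Mathlib
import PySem

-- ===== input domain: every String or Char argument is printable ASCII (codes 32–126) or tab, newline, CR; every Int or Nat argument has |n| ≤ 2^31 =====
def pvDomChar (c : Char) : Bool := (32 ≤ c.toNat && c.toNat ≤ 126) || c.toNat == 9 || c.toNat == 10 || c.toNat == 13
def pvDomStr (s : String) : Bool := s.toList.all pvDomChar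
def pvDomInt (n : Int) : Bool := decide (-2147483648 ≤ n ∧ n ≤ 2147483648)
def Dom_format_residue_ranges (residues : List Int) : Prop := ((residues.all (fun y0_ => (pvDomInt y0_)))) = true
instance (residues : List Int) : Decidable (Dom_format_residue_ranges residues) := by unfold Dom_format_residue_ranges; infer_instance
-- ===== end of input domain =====

-- B replaces A's stateful scan (start/prev registers, in-loop emission, duplicated trailing
-- flush) by stateless staged passes: break pairs from zipping the sorted list with its shift,
-- whole start/end lists from them, then one zip for formatting; objective: alternative.

-- ===== PORT A =====
-- the duplicated 'if start == prev then str(start) else f"{start}..{prev}"' appends of A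
def pvFmtA (start prev : Int) : String :=
  if start == prev then PySem.Int.toStr start
  else PySem.Int.toStr start ++ ".." ++ PySem.Int.toStr prev

def format_residue_ranges (residues : List Int) : String :=
  if residues = [] then ""
  else
    let ints := PySem.List.sorted residues (fun x => x) false
    let start := PySem.List.pyGetD ints 0 0
    let prev := PySem.List.pyGetD ints 0 0
    let st := (PySem.List.slice ints (some 1) none).foldl
      (fun (s : Int × Int × List String) x =>
        if x == s.2.1 + 1 then (s.1, x, s.2.2)
        else (x, x, s.2.2 ++ [pvFmtA s.1 s.2.1]))
      (start, prev, [])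
    PySem.Str.join "," (st.2.2 ++ [pvFmtA st.1 st.2.1])

-- ===== PORT B =====
def format_residue_ranges_alt (residues : List Int) : String :=
  let ints := PySem.List.sorted residues (fun x => x) false
  if ints = [] then ""
  else
    let breaks := (ints.zip (PySem.List.slice ints (some 1) none)).filter
      (fun p => !(p.2 == p.1 + 1))
    let starts := [PySem.List.pyGetD ints 0 0] ++ breaks.map (fun p => p.2)
    let ends := breaks.map (fun p => p.1) ++ [PySem.List.pyGetD ints (-1) 0]
    PySem.Str.join "," ((starts.zip ends).map (fun p =>
      if p.1 == p.2 then PySem.Int.toStr p.1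
      else PySem.Int.toStr p.1 ++ ".." ++ PySem.Int.toStr p.2))

-- ===== PRECONDITION & SPEC =====
def Spec_format_residue_ranges (residues : List Int) (out : String) : Prop := out = format_residue_ranges_alt residues
instance (residues : List Int) (out : String) : Decidable (Spec_format_residue_ranges residues out) := by unfold Spec_format_residue_ranges; infer_instance

-- ===== CLAIM (what is proved, stated in full; the proofs are below) =====
def Claim_equal_format_residue_ranges : Prop := ∀ (residues : List Int), Dom_format_residue_ranges residues → Spec_format_residue_ranges residues (format_residue_ranges residues)

-- ===== LEMMAS AND PROOFS =====

-- the canonical run decomposition both programs compute: current run a..b, remaining list xs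
-- (b is always the element A's loop last consumed, so no ordering assumptions are needed)
def pvRuns (a b : Int) : List Int → List (Int × Int)
  | [] => [(a, b)]
  | x :: xs => if x = b + 1 then pvRuns a x xs else (a, b) :: pvRuns x x xs

-- A's loop plus the trailing flush formats exactly the canonical runs
theorem pvALoop (xs : List Int) : ∀ (a b : Int) (acc : List String),
    (xs.foldl
      (fun (s : Int × Int × List String) x =>
        if x == s.2.1 + 1 then (s.1, x, s.2.2)
        else (x, x, s.2.2 ++ [pvFmtA s.1 s.2.1]))
      (a, b, acc)).2.2 ++
    [pvFmtA (xs.foldl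
      (fun (s : Int × Int × List String) x =>
        if x == s.2.1 + 1 then (s.1, x, s.2.2)
        else (x, x, s.2.2 ++ [pvFmtA s.1 s.2.1]))
      (a, b, acc)).1 (xs.foldl
      (fun (s : Int × Int × List String) x =>
        if x == s.2.1 + 1 then (s.1, x, s.2.2)
        else (x, x, s.2.2 ++ [pvFmtA s.1 s.2.1]))
      (a, b, acc)).2.1]
    = acc ++ (pvRuns a b xs).map (fun p => pvFmtA p.1 p.2) := by
  induction xs with
  | nil => intro a b acc; simp [pvRuns]
  | cons x xs ih =>
    intro a b acc
    by_cases hx : x = b + 1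
    · simpa [pvRuns, hx] using ih a x acc
    · have hx' : (x == b + 1) = false := by simpa using hx
      simp only [pvRuns, hx, if_false, List.foldl_cons, hx', Bool.false_eq_true,
        List.map_cons]
      rw [ih x x (acc ++ [pvFmtA a b])]
      simp

-- B's zip of the start list with the end list is exactly the canonical runs
theorem pvZip (xs : List Int) : ∀ a b : Int,
    ((a :: (((b :: xs).zip xs).filter (fun p => !(p.2 == p.1 + 1))).map (fun p => p.2)).zip
      ((((b :: xs).zip xs).filter (fun p => !(p.2 == p.1 + 1))).map (fun p => p.1) ++
        [(b :: xs).getLast (List.cons_ne_nil b xs)]))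
    = pvRuns a b xs := by
  induction xs with
  | nil => intro a b; simp [pvRuns]
  | cons x xs ih =>
    intro a b
    have hlast : (b :: x :: xs).getLast (List.cons_ne_nil b (x :: xs)) =
        (x :: xs).getLast (List.cons_ne_nil x xs) := List.getLast_cons (List.cons_ne_nil x xs)
    by_cases hx : x = b + 1
    · have hx' : (x == b + 1) = true := by simpa using hx
      rw [pvRuns, if_pos hx, ← ih a x]
      subst hx
      simp [hlast]
    · have hx' : (x == b + 1) = false := by simpa using hx
      rw [pvRuns, if_neg hx, ← ih x x]
      simp [List.zip_cons_cons, hx', hlast]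

-- ===== VERDICT (by name: the statement is the Claim_ definition above) =====
theorem format_residue_ranges_spec : Claim_equal_format_residue_ranges := by
  intro residues _
  unfold Spec_format_residue_ranges format_residue_ranges format_residue_ranges_alt
  by_cases h : residues = []
  · subst h; decide
  · simp only [h, if_false]
    rcases hLs : PySem.List.sorted residues (fun x => x) false with _ | ⟨x, rest⟩
    · exfalso
      have := PySem.List.length_sorted residues (fun x => x) false
      rw [hLs] at this
      exact h (List.eq_nil_of_length_eq_zero this.symm)
    · simp only [List.cons_ne_nil, if_false, PySem.List.pyGetD_zero_cons,
        PySem.List.slice_from_one (x :: rest), List.tail_cons, List.singleton_append,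
        PySem.List.pyGetD_neg_one (x :: rest) 0 (List.cons_ne_nil x rest)]
      rw [pvALoop rest x x [], pvZip rest x x]
      simp [pvFmtA]
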